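/-
  `CodebookOK c` = K1 – K6 with K4c and K5 (INVARIANTS §3.2; design/I2 §1.3; DECISIONS §1 FIX 3, 4, 6, 7 and D-2, D-4, D-18).
  `c` is the address of ONE `Codebook` (2120 bytes), normally `cb(i) = stb_vorbis.codebooks_at mem f i` with `i < codebook_count`;
  it never moves. "The struct at `c` lies inside an allocated block" is the pair `(hB : Blk B) (hin : B.contains c 2120)`
  (from `CodebooksOK`: `h0.F2`, `h0.cb_in b hb`).

      Codebook.N mem c                 N(c) := sparse ? sorted_entries : entries           (an `Int`, like the two fields)
      Codebook.K1 … K6, K4c, K5        the clauses, one definition each (a start_decoder segment holds some of them, not yet all);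
                                       the SHAPE clauses K3n, K3s, K4, K6 are stated over `Blk : Block → Prop`
      CodebookOK Blk mem c             the structure of all of them: `h.K5 k hk`, `h.K4.sentinel hse`, …
      h.lengths_block                  K3n / K3s in one: `codeword_lengths` is a block of N(c) bytes
      h.codewords_ne_zero_iff hok …    the pointer equivalences codebook_decode_scalar_raw branches on (`hok : BlkOK Blk`)
      Codebook.site_field / site_fast_huffman hL hB hin …      USE: a field / a `fast_huffman` entry of the struct at `c`
      h.site_… hL …                    USE: the check site of each table access, as a `Site Live a n`
      CodebookOK.Owns mem c B          the blocks the SHAPE clauses mention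
      CodebookOK.transfer              FRAME: the struct at `c` and the `sorted_values` block are `Kept`, the owned blocks are
                                       still allocated ⇒ `CodebookOK Blk' mem' c`;  `.frame` (same `Blk`), `.reblk` (same memory),
                                       `.frame_writeLE`, `.frame_sameExcept`, `.owns_blk`, `.reads_blk`
      Codebook.SameFields, K1.frame … K6.frame, K5b.frame     per clause, for the segments that hold only some clauses
      DecodeRawResult / DecodeResult   the statement of Lemma DecodeRaw, and its three pure steps (fast path, search result,
                                       the `sorted_values` translation of DECODE, sentinel included)

  K3e (the empty sparse book) does not exist: FIX 4 rejects `sparse ∧ sorted_entries = 0` at setup, so K2 has `sparse = 1 → 1 ≤ se`.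
-/
import Vorbis.Codebook.Header
namespace Vorbis
open X86 X86.User Asan

namespace Codebook

/-! ### N(c) and the clauses -/

/-- **N(c)** `:= c.sparse ? c.sorted_entries : c.entries`: the range of the index DECODE_RAW returns, = the length of the
`codeword_lengths` block. -/
def N (mem : Mem) (c : Nat) : Int :=
  if Codebook.sparse mem c = 0 then Codebook.entries mem c else Codebook.sorted_entries mem c

/-- N(c) of a book that is not sparse. -/
theorem N_dense {mem : Mem} {c : Nat} (h : Codebook.sparse mem c = 0) : N mem c = Codebook.entries mem c := by
  unfold N
  rw [if_pos h]

/-- N(c) of a sparse book. -/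
theorem N_sparse {mem : Mem} {c : Nat} (h : Codebook.sparse mem c ≠ 0) : N mem c = Codebook.sorted_entries mem c := by
  unfold N
  rw [if_neg h]

/-- The struct itself, as a block: `[c, c + 2120)`. -/
abbrev block (c : Nat) : Block := ⟨c, Off.sizeof.Codebook⟩

/-- The block behind `c->sorted_values`: it starts 4 bytes BEFORE the pointer and has `se + 1` words (the sentinel, then the table).
Meaningful when `se ≥ 1`. -/
abbrev svBlock (mem : Mem) (c : Nat) : Block :=
  ⟨Codebook.sorted_values mem c - 4, 4 * ((Codebook.sorted_entries mem c).toNat + 1)⟩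

/-- The block behind `c->codeword_lengths`: `N(c)` bytes (dense: `entries`, K3n; sparse: `sorted_entries`, K3s). Every decode
through the book reads it (`CodebookOK.lengths_block`: it is an allocated block), so it is one of the blocks the configuration
READS (`ConfigOK.Reads.lengths`) and the separation clause covers it. -/
def clBlock (mem : Mem) (c : Nat) : Block :=
  ⟨Codebook.codeword_lengths mem c, (N mem c).toNat⟩

/-- **K1** (FIELD; lines 3755–3764 + FIX 6): `1 ≤ dimensions ≤ 65535`, `0 ≤ entries ≤ 2^24 − 1`. Relied on by the `idiv` of
residue_decode, the progress of `k += dimensions` and of `total_decode -= effective`, R7b. -/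
structure K1 (mem : Mem) (c : Nat) : Prop where
  /-- FIX 6: a codebook with `dimensions = 0` is rejected. -/
  dim_pos : 1 ≤ Codebook.dimensions mem c
  /-- Two zero-extended bytes. -/
  dim_le : Codebook.dimensions mem c ≤ 65535
  /-- Three zero-extended bytes. -/
  ent_nonneg : 0 ≤ Codebook.entries mem c
  /-- Three zero-extended bytes. -/
  ent_lt : Codebook.entries mem c < 16777216

/-- **K2** (FIELD; lines 3762, 3806–3824 + FIX 4): `sparse ∈ {0,1}`; `0 ≤ se ≤ entries`; `sparse = 1 → 1 ≤ se ∧ 4·se < entries`. -/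
structure K2 (mem : Mem) (c : Nat) : Prop where
  /-- `sparse = ordered ? 0 : get_bits(f, 1)`, possibly reset to 0 by the conversion. -/
  sparse_01 : Codebook.sparse mem c = 0 ∨ Codebook.sparse mem c = 1
  /-- A count. -/
  se_nonneg : 0 ≤ Codebook.sorted_entries mem c
  /-- A count of entries. -/
  se_le : Codebook.sorted_entries mem c ≤ Codebook.entries mem c
  /-- FIX 4: an empty sparse book is rejected. -/
  sparse_pos : Codebook.sparse mem c = 1 → 1 ≤ Codebook.sorted_entries mem c
  /-- A book stays sparse only if `total < entries >> 2`. -/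
  sparse_quarter : Codebook.sparse mem c = 1 → 4 * Codebook.sorted_entries mem c < Codebook.entries mem c

/-- **K3n** (SHAPE; lines 3769 / 3804, 3829), the case `sparse = 0`: `codeword_lengths` is an allocated block of EXACTLY `entries`
bytes, `codewords` one of EXACTLY `4·entries` bytes (both possibly of 0 bytes). -/
structure K3n (Blk : Block → Prop) (mem : Mem) (c : Nat) : Prop where
  /-- `c->codeword_lengths = setup_malloc(f, c->entries)`. -/
  lengths : Blk ⟨Codebook.codeword_lengths mem c, (Codebook.entries mem c).toNat⟩
  /-- `c->codewords = setup_malloc(f, sizeof(c->codewords[0]) * c->entries)`. -/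
  codewords : Blk ⟨Codebook.codewords mem c, 4 * (Codebook.entries mem c).toNat⟩

/-- **K3s** (SHAPE; lines 3834, 3869), the case `sparse = 1`: `codeword_lengths` is an allocated block of EXACTLY `se` bytes,
`codewords = NULL`. (During the construction `codewords` is a temp block: `K3t` of Vorbis/Codebook/Build.lean, D-20.) -/
structure K3s (Blk : Block → Prop) (mem : Mem) (c : Nat) : Prop where
  /-- `c->codeword_lengths = setup_malloc(f, c->sorted_entries)`. -/
  lengths : Blk ⟨Codebook.codeword_lengths mem c, (Codebook.sorted_entries mem c).toNat⟩
  /-- `c->codewords = NULL` after the temp block is freed. -/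
  codewords_null : Codebook.codewords mem c = 0

/-- **K3** = K3n for a dense book, K3s for a sparse one. (K3e is removed by FIX 4.) -/
structure K3 (Blk : Block → Prop) (mem : Mem) (c : Nat) : Prop where
  /-- the dense shape -/
  dense : Codebook.sparse mem c = 0 → K3n Blk mem c
  /-- the sparse shape -/
  sparse : Codebook.sparse mem c = 1 → K3s Blk mem c

/-- **K4** (SHAPE + one CONTENT word; lines 3853–3861). `se ≥ 1`: `sorted_codewords` is an allocated block of EXACTLY `4(se+1)`
bytes; `sorted_values = B + 4` for an allocated block `B` of EXACTLY `4(se+1)` bytes; **`B[0] = sorted_values[-1] = −1`** —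
LOAD-BEARING: all five DECODE expansions load it when `var = −1` and test `== −1` only afterwards. `se = 0`: both pointers NULL
(from the zero fill ZF). -/
structure K4 (Blk : Block → Prop) (mem : Mem) (c : Nat) : Prop where
  /-- the `sorted_codewords` block (`se` words and the `0xffffffff` sentinel word) -/
  sc : 1 ≤ Codebook.sorted_entries mem c →
    Blk ⟨Codebook.sorted_codewords mem c, 4 * ((Codebook.sorted_entries mem c).toNat + 1)⟩
  /-- the `sorted_values` block (`Codebook.svBlock mem c`), which starts 4 bytes BEFORE the pointer (`++c->sorted_values`) -/
  sv : 1 ≤ Codebook.sorted_entries mem c →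
    Blk ⟨Codebook.sorted_values mem c - 4, 4 * ((Codebook.sorted_entries mem c).toNat + 1)⟩
  /-- `c->sorted_values[-1] = -1` -/
  sentinel : 1 ≤ Codebook.sorted_entries mem c → mem.i32 (Codebook.sorted_values mem c - 4) = -1
  /-- no sorted tables for `se = 0` -/
  null : Codebook.sorted_entries mem c = 0 →
    Codebook.sorted_codewords mem c = 0 ∧ Codebook.sorted_values mem c = 0

/-- **K4c** (CONTENT; FIX 7's zero fill + both store sites of compute_sorted_huffman): `∀ x < se: 0 ≤ sorted_values[x] < entries`.
No onto-ness, no sortedness. Relied on by `codeword_lengths[sorted_values[x]]` (non-sparse binary search) and by DECODE's result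
range (→ `classdata[q]`, R8a). -/
def K4c (mem : Mem) (c : Nat) : Prop :=
  ∀ x : Nat, (x : Int) < Codebook.sorted_entries mem c →
    0 ≤ mem.i32 (Codebook.sorted_values_at mem c x) ∧
      mem.i32 (Codebook.sorted_values_at mem c x) < Codebook.entries mem c

/-- K5 with an explicit bound `b` in place of `min(N(c), 32767)`: the loop invariant of compute_accelerated_huffman is `K5b` with
`b = i`. -/
def K5b (mem : Mem) (c : Nat) (b : Int) : Prop :=
  ∀ k, k < 1024 → Codebook.fast_huffman mem c k = -1 ∨
    (0 ≤ Codebook.fast_huffman mem c k ∧ Codebook.fast_huffman mem c k < b)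

/-- **K5** (CONTENT; compute_accelerated_huffman): `∀ k < 1024: fast_huffman[k] = −1 ∨ 0 ≤ fast_huffman[k] < min(N(c), 32767)`.
Relied on by `codeword_lengths[fast_huffman[acc & 1023]]` in the 5 + 2 inline expansions of DECODE_RAW. -/
def K5 (mem : Mem) (c : Nat) : Prop :=
  ∀ k, k < 1024 → Codebook.fast_huffman mem c k = -1 ∨
    (0 ≤ Codebook.fast_huffman mem c k ∧ Codebook.fast_huffman mem c k < N mem c ∧
      Codebook.fast_huffman mem c k < 32767)

/-- **K6** (FIELD + SHAPE; lines 3874–3945 + FIX 3): `lookup_type ∈ {0, 2}` (type 1 is expanded to 2; with FIX 4 no book keeps type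
1); type 2: `N(c)·dimensions ≤ 1FFFFFFFH` and `multiplicands` is an allocated block of AT LEAST `4·N(c)·dimensions` bytes — the
`∃ sz` form, because the source does not always allocate exactly that many: an expanded type 1 allocates
`sizeof(float)·N(c)·dimensions`, a type 2 allocates `sizeof(float)·lookup_values = 4·entries·dimensions`, which is more for a
sparse book;
type 0: `multiplicands = NULL`, never dereferenced. -/
structure K6 (Blk : Block → Prop) (mem : Mem) (c : Nat) : Prop where
  /-- `get_bits(f, 4)`, `> 2` rejected, 1 rewritten to 2 -/
  type_02 : Codebook.lookup_type mem c = 0 ∨ Codebook.lookup_type mem c = 2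
  /-- FIX 3: no 32-bit wrap of any size or index -/
  prod_le : Codebook.lookup_type mem c = 2 → N mem c * Codebook.dimensions mem c ≤ 0x1FFFFFFF
  /-- the table of at least `N(c) · dimensions` floats -/
  mults : Codebook.lookup_type mem c = 2 →
    ∃ sz, 4 * ((N mem c).toNat * (Codebook.dimensions mem c).toNat) ≤ sz ∧ Blk ⟨Codebook.multiplicands mem c, sz⟩
  /-- from the zero fill -/
  null : Codebook.lookup_type mem c = 0 → Codebook.multiplicands mem c = 0

end Codebook

/-- **`CodebookOK c`** := K1 – K6 (+ K4c, K5) for the codebook at address `c` (INVARIANTS §3.2). Established by one iteration of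
the codebook loop of start_decoder, read-only afterwards. `Blk` is the ghost "is an allocated block". -/
structure CodebookOK (Blk : Block → Prop) (mem : Mem) (c : Nat) : Prop where
  /-- dimensions / entries ranges -/
  K1 : Codebook.K1 mem c
  /-- sparse, sorted_entries -/
  K2 : Codebook.K2 mem c
  /-- codeword_lengths / codewords blocks -/
  K3 : Codebook.K3 Blk mem c
  /-- sorted_codewords / sorted_values blocks, the sentinel -/
  K4 : Codebook.K4 Blk mem c
  /-- every `sorted_values[x] < entries` -/
  K4c : Codebook.K4c mem c
  /-- every `fast_huffman[k]` is −1 or an index -/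
  K5 : Codebook.K5 mem c
  /-- lookup_type, multiplicands -/
  K6 : Codebook.K6 Blk mem c

namespace Codebook

/-! ### Ranges that follow from K1, K2 -/

/-- `0 ≤ N(c)`. -/
theorem N_nonneg {mem : Mem} {c : Nat} (h1 : K1 mem c) (h2 : K2 mem c) : 0 ≤ N mem c := by
  unfold N
  have := h1.ent_nonneg
  have := h2.se_nonneg
  split <;> omega

/-- `N(c) ≤ entries`. -/
theorem N_le_entries {mem : Mem} {c : Nat} (h2 : K2 mem c) : N mem c ≤ Codebook.entries mem c := by
  unfold N
  have := h2.se_le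
  split <;> omega

/-- `N(c) < 2^24`. -/
theorem N_lt {mem : Mem} {c : Nat} (h1 : K1 mem c) (h2 : K2 mem c) : N mem c < 16777216 := by
  have := N_le_entries h2
  have := h1.ent_lt
  omega

/-- `sparse` is 1 as soon as it is not 0. -/
theorem K2.sparse_one {mem : Mem} {c : Nat} (h2 : K2 mem c) (h : Codebook.sparse mem c ≠ 0) : Codebook.sparse mem c = 1 := by
  cases h2.sparse_01 with
  | inl h0 => exact absurd h0 h
  | inr h1 => exact h1

/-- A sparse book has `se < entries` (from `4·se < entries`). -/
theorem K2.se_lt_of_sparse {mem : Mem} {c : Nat} (h2 : K2 mem c) (h : Codebook.sparse mem c ≠ 0) :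
    Codebook.sorted_entries mem c < Codebook.entries mem c := by
  have h1 := h2.sparse_one h
  have := h2.sparse_quarter h1
  have := h2.se_nonneg
  omega

/-- A book with sorted tables has at least one entry (so the zero of FIX 7's fill is a valid `sorted_values` word). -/
theorem K2.entries_pos {mem : Mem} {c : Nat} (h2 : K2 mem c) (h : 1 ≤ Codebook.sorted_entries mem c) :
    1 ≤ Codebook.entries mem c := by
  have := h2.se_le
  omega

/-- K5 is `K5b` with the bound `min(N(c), 32767)`, spelt as two inequalities. -/
theorem K5_iff (mem : Mem) (c : Nat) : K5 mem c ↔ (K5b mem c (N mem c) ∧ K5b mem c 32767) := by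
  constructor
  · intro h
    constructor
    · intro k hk
      cases h k hk with
      | inl h1 => exact Or.inl h1
      | inr h2 => exact Or.inr ⟨h2.1, h2.2.1⟩
    · intro k hk
      cases h k hk with
      | inl h1 => exact Or.inl h1
      | inr h2 => exact Or.inr ⟨h2.1, h2.2.2⟩
  · intro h k hk
    cases h.1 k hk with
    | inl h1 => exact Or.inl h1
    | inr h2 =>
      cases h.2 k hk with
      | inl h3 => exact Or.inl h3
      | inr h4 => exact Or.inr ⟨h2.1, h2.2, h4.2⟩

/-- `K5b` with a larger bound. -/
theorem K5b.mono {mem : Mem} {c : Nat} {b b' : Int} (h : K5b mem c b) (hb : b ≤ b') : K5b mem c b' := by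
  intro k hk
  cases h k hk with
  | inl h1 => exact Or.inl h1
  | inr h2 => exact Or.inr ⟨h2.1, by omega⟩

/-- The value compute_accelerated_huffman stores: `i < len = min(N(c), 32767)` as a non-negative `int16` gives K5 from the loop's
final invariant `K5b mem c len`. -/
theorem K5.of_K5b {mem : Mem} {c : Nat} {len : Int} (h : K5b mem c len) (h1 : len ≤ N mem c) (h2 : len ≤ 32767) :
    K5 mem c :=
  (K5_iff mem c).mpr ⟨h.mono h1, h.mono h2⟩

end Codebook

namespace CodebookOK
open Codebook

/-! ### Derived shape facts -/

/-- `0 ≤ N(c)`. -/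
theorem N_nonneg {Blk : Block → Prop} {mem : Mem} {c : Nat} (h : CodebookOK Blk mem c) : 0 ≤ N mem c :=
  Codebook.N_nonneg h.K1 h.K2

/-- `N(c) ≤ entries`. -/
theorem N_le_entries {Blk : Block → Prop} {mem : Mem} {c : Nat} (h : CodebookOK Blk mem c) :
    N mem c ≤ Codebook.entries mem c :=
  Codebook.N_le_entries h.K2

/-- **K3n and K3s in one: `codeword_lengths` is an allocated block of N(c) bytes.** -/
theorem lengths_block {Blk : Block → Prop} {mem : Mem} {c : Nat} (h : CodebookOK Blk mem c) :
    Blk ⟨Codebook.codeword_lengths mem c, (N mem c).toNat⟩ := by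
  by_cases hs : Codebook.sparse mem c = 0
  · rw [N_dense hs]
    exact (h.K3.dense hs).lengths
  · rw [N_sparse hs]
    exact (h.K3.sparse (h.K2.sparse_one hs)).lengths

/-- **Pointer equivalence 1** (codebook_decode_scalar_raw's path choice): `codewords ≠ NULL ↔ sparse = 0`. The base of an
allocated block is not NULL: `hok.ne_null`. -/
theorem codewords_ne_zero_iff {Blk : Block → Prop} {mem : Mem} {c : Nat} (h : CodebookOK Blk mem c) (hok : BlkOK Blk) :
    Codebook.codewords mem c ≠ 0 ↔ Codebook.sparse mem c = 0 := by
  constructor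
  · intro hne
    apply Classical.byContradiction
    intro hs
    exact hne (h.K3.sparse (h.K2.sparse_one hs)).codewords_null
  · intro hs
    exact hok.ne_null (h.K3.dense hs).codewords

/-- **Pointer equivalence 2**: `sorted_codewords ≠ NULL ↔ 1 ≤ sorted_entries`. -/
theorem sorted_codewords_ne_zero_iff {Blk : Block → Prop} {mem : Mem} {c : Nat} (h : CodebookOK Blk mem c)
    (hok : BlkOK Blk) : Codebook.sorted_codewords mem c ≠ 0 ↔ 1 ≤ Codebook.sorted_entries mem c := by
  have h0 := h.K2.se_nonneg
  constructor
  · intro hne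
    apply Classical.byContradiction
    intro hlt
    have hz : Codebook.sorted_entries mem c = 0 := by omega
    exact hne (h.K4.null hz).1
  · intro hse
    exact hok.ne_null (h.K4.sc hse)

/-- Both tables NULL (the first test of codebook_decode_scalar_raw, `return -1`) cannot happen: a dense book has `codewords`, a
sparse one has `se ≥ 1` (FIX 4). The arm is dead; it is safe anyway. -/
theorem not_both_null {Blk : Block → Prop} {mem : Mem} {c : Nat} (h : CodebookOK Blk mem c) (hok : BlkOK Blk) :
    ¬ (Codebook.codewords mem c = 0 ∧ Codebook.sorted_codewords mem c = 0) := by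
  intro hboth
  by_cases hs : Codebook.sparse mem c = 0
  · exact ((h.codewords_ne_zero_iff hok).mpr hs) hboth.1
  · have hse := h.K2.sparse_pos (h.K2.sparse_one hs)
    exact ((h.sorted_codewords_ne_zero_iff hok).mpr hse) hboth.2

/-- The `sorted_values` pointer of a book with sorted tables is 4 bytes into its block: `sorted_values = B + 4`, `B ≠ NULL`. -/
theorem sorted_values_ge {Blk : Block → Prop} {mem : Mem} {c : Nat} (h : CodebookOK Blk mem c) (hok : BlkOK Blk)
    (hse : 1 ≤ Codebook.sorted_entries mem c) : 5 ≤ Codebook.sorted_values mem c := by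
  have hne : Codebook.sorted_values mem c - 4 ≠ 0 := hok.ne_null (h.K4.sv hse)
  omega

/-- A sparse book has sorted tables (FIX 4). -/
theorem se_pos_of_sparse {Blk : Block → Prop} {mem : Mem} {c : Nat} (h : CodebookOK Blk mem c)
    (hs : Codebook.sparse mem c ≠ 0) : 1 ≤ Codebook.sorted_entries mem c :=
  h.K2.sparse_pos (h.K2.sparse_one hs)

/-! ### USE: the check site of each access (`site_…`)

Each lemma returns `Site Live a n` for ANY spelling `a` of the address (last argument `ha : a = …` in accessor form; closed by
`rfl` or `by simp only [vacc, voff]; omega`). From the `Site`: `.acc hc`, `.acc_addr hc`, `.acc_range hc`, `.has hc hL`,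
`.inside hc`, `.inLive`. An index is a `Nat` compared with the `Int` field: `(i : Int) < Codebook.entries mem c`. -/

/-- **A field of the struct at `c`**: the `n` bytes at offset `off`, `off + n ≤ 2120`, when the struct lies inside the allocated
block `B` (`CodebooksOK`: `h0.F2`, `h0.cb_in b hb`). (Needs no clause of `CodebookOK`.) -/
theorem _root_.Vorbis.Codebook.site_field {Blk : Block → Prop} {Live : Nat → Prop} {c : Nat} (hL : BlkLive Blk Live)
    {B : Block} (hB : Blk B) (hin : B.contains c Off.sizeof.Codebook) (off n : Nat) (hoff : off + n ≤ Off.sizeof.Codebook)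
    (hn : 1 ≤ n) {a : Nat} (ha : a = c + off) : Site Live a n := by
  subst ha
  simp only [vblock] at hin
  apply Site.of_blk hL hB
  · omega
  · omega
  · exact hn

/-- **`c->fast_huffman[k]`, `k < 1024`**: inside the struct (`__asan_load2_noabort` in every DECODE_RAW expansion, the two
`store2` of compute_accelerated_huffman), for any spelling `a` of `c + 48 + 2 * k`. (Needs no clause of `CodebookOK`.) -/
theorem _root_.Vorbis.Codebook.site_fast_huffman {Blk : Block → Prop} {Live : Nat → Prop} {c : Nat} (hL : BlkLive Blk Live)
    {B : Block} (hB : Blk B) (hin : B.contains c Off.sizeof.Codebook) (k : Nat) (hk : k < 1024) {a : Nat}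
    (ha : a = c + Off.Codebook.fast_huffman + Off.Codebook.fast_huffman.elem * k) : Site Live a 2 := by
  apply Codebook.site_field hL hB hin (Off.Codebook.fast_huffman + Off.Codebook.fast_huffman.elem * k) 2
  · simp only [voff]
    omega
  · omega
  · rw [ha, Nat.add_assoc]

/-- `c->codeword_lengths[i]`, `i < N(c)`. -/
theorem site_codeword_lengths {Blk : Block → Prop} {Live : Nat → Prop} {mem : Mem} {c : Nat} (hL : BlkLive Blk Live)
    (h : CodebookOK Blk mem c) (i : Nat) (hi : (i : Int) < N mem c) {a : Nat}
    (ha : a = Codebook.codeword_lengths_at mem c i) : Site Live a 1 := by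
  subst ha
  apply Site.of_blk hL h.lengths_block
  · simp only [Codebook.codeword_lengths_at]
    omega
  · simp only [Codebook.codeword_lengths_at]
    omega
  · omega

/-- `c->codewords[i]`, `i < entries`, of a dense book (the linear search of codebook_decode_scalar_raw). -/
theorem site_codewords {Blk : Block → Prop} {Live : Nat → Prop} {mem : Mem} {c : Nat} (hL : BlkLive Blk Live)
    (h : CodebookOK Blk mem c) (hs : Codebook.sparse mem c = 0) (i : Nat) (hi : (i : Int) < Codebook.entries mem c)
    {a : Nat} (ha : a = Codebook.codewords_at mem c i) : Site Live a 4 := by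
  subst ha
  apply Site.of_blk hL (h.K3.dense hs).codewords
  · simp only [Codebook.codewords_at]
    omega
  · simp only [Codebook.codewords_at]
    omega
  · omega

/-- `c->sorted_codewords[x]`, `x ≤ se` (the `se` words the binary search probes — `x < se`, the probe `m` of BS — and the
sentinel word at `se`), when `se ≥ 1`. -/
theorem site_sorted_codewords {Blk : Block → Prop} {Live : Nat → Prop} {mem : Mem} {c : Nat} (hL : BlkLive Blk Live)
    (h : CodebookOK Blk mem c) (x : Nat) (hx : (x : Int) ≤ Codebook.sorted_entries mem c)
    (hse : 1 ≤ Codebook.sorted_entries mem c) {a : Nat} (ha : a = Codebook.sorted_codewords_at mem c x) :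
    Site Live a 4 := by
  subst ha
  apply Site.of_blk hL (h.K4.sc hse)
  · simp only [Codebook.sorted_codewords_at]
    omega
  · simp only [Codebook.sorted_codewords_at]
    omega
  · omega

/-- `c->sorted_values[x]`, `x < se`. -/
theorem site_sorted_values {Blk : Block → Prop} {Live : Nat → Prop} {mem : Mem} {c : Nat} (hL : BlkLive Blk Live)
    (h : CodebookOK Blk mem c) (x : Nat) (hx : (x : Int) < Codebook.sorted_entries mem c) {a : Nat}
    (ha : a = Codebook.sorted_values_at mem c x) : Site Live a 4 := by
  subst ha
  have hse : 1 ≤ Codebook.sorted_entries mem c := by omega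
  apply Site.of_blk hL (h.K4.sv hse)
  · simp only [Codebook.sorted_values_at]
    omega
  · simp only [Codebook.sorted_values_at]
    omega
  · omega

/-- **`c->sorted_values[-1]`**: the word before the pointer is a check site when `se ≥ 1` (the load every DECODE expansion does
with `var = −1`), for any spelling `a` of `sorted_values − 4`. -/
theorem site_sorted_values_m1 {Blk : Block → Prop} {Live : Nat → Prop} {mem : Mem} {c : Nat} (hL : BlkLive Blk Live)
    (h : CodebookOK Blk mem c) (hse : 1 ≤ Codebook.sorted_entries mem c) {a : Nat}
    (ha : a = Codebook.sorted_values mem c - 4) : Site Live a 4 := by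
  subst ha
  apply Site.of_blk hL (h.K4.sv hse)
  · exact Nat.le_refl _
  · simp only []
    omega
  · omega

/-- `c->multiplicands[z * dimensions + i]`, `z < N(c)`, `i < dimensions`, `lookup_type = 2` (codebook_decode, _step,
_deinterleave_repeat), for any spelling `a` of the address; the element index is `z·dimensions` (in a register or a slot)
plus `i`. -/
theorem site_multiplicands {Blk : Block → Prop} {Live : Nat → Prop} {mem : Mem} {c : Nat} (hL : BlkLive Blk Live)
    (h : CodebookOK Blk mem c) (ht : Codebook.lookup_type mem c = 2) (z i : Nat) (hz : (z : Int) < N mem c)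
    (hi : (i : Int) < Codebook.dimensions mem c) {a : Nat}
    (ha : a = Codebook.multiplicands_at mem c (z * (Codebook.dimensions mem c).toNat + i)) : Site Live a 4 := by
  subst ha
  have hz' : z < (N mem c).toNat := by omega
  have hi' : i < (Codebook.dimensions mem c).toNat := by omega
  have hlt := mult_index_lt hz' hi'
  obtain ⟨sz, hsz, hblk⟩ := h.K6.mults ht
  apply Site.of_blk hL hblk
  · simp only [Codebook.multiplicands_at]
    omega
  · simp only [Codebook.multiplicands_at]
    omega
  · omega

/-- The element index `z * dimensions + i` and its byte offset do not wrap 32 bits (K6 / FIX 3): what `imul r32` and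
`movsxd ; shl 2` need. -/
theorem multiplicands_index_lt {Blk : Block → Prop} {mem : Mem} {c : Nat} (h : CodebookOK Blk mem c)
    (ht : Codebook.lookup_type mem c = 2) (z i : Nat) (hz : (z : Int) < N mem c)
    (hi : (i : Int) < Codebook.dimensions mem c) :
    z * (Codebook.dimensions mem c).toNat + i < 0x20000000 := by
  have hz' : z < (N mem c).toNat := by omega
  have hi' : i < (Codebook.dimensions mem c).toNat := by omega
  have hlt := mult_index_lt hz' hi'
  have hp := h.K6.prod_le ht
  have hN := h.N_nonneg
  have hd := h.K1.dim_pos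
  have e : ((N mem c).toNat * (Codebook.dimensions mem c).toNat : Nat) = (N mem c * Codebook.dimensions mem c).toNat := by
    have e1 : ((N mem c).toNat : Int) = N mem c := Int.toNat_of_nonneg hN
    have e2 : ((Codebook.dimensions mem c).toNat : Int) = Codebook.dimensions mem c := Int.toNat_of_nonneg (by omega)
    apply Int.ofNat_inj.mp
    rw [Int.natCast_mul, e1, e2, Int.toNat_of_nonneg (Int.mul_nonneg hN (by omega))]
  omega

/-! ### The two value-dependent accesses: the index comes out of a table -/

/-- **The fast path of DECODE_RAW**: `var = c->fast_huffman[k]`, `var ≥ 0` ⇒ `c->codeword_lengths[var]` is inside its block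
(K5 + K3). -/
theorem site_lengths_of_fast {Blk : Block → Prop} {Live : Nat → Prop} {mem : Mem} {c : Nat} (hL : BlkLive Blk Live)
    (h : CodebookOK Blk mem c) (k : Nat) (hk : k < 1024) (hv : 0 ≤ Codebook.fast_huffman mem c k) {a : Nat}
    (ha : a = Codebook.codeword_lengths_at mem c (Codebook.fast_huffman mem c k).toNat) : Site Live a 1 := by
  apply h.site_codeword_lengths hL _ _ ha
  cases h.K5 k hk with
  | inl h1 => omega
  | inr h2 => omega

/-- **The dense binary search**: `x < se`, `if (!c->sparse) x = c->sorted_values[x]` ⇒ `c->codeword_lengths[x]` is inside its block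
(K4c + K3n). -/
theorem site_lengths_of_sorted {Blk : Block → Prop} {Live : Nat → Prop} {mem : Mem} {c : Nat} (hL : BlkLive Blk Live)
    (h : CodebookOK Blk mem c) (hs : Codebook.sparse mem c = 0) (x : Nat)
    (hx : (x : Int) < Codebook.sorted_entries mem c) {a : Nat}
    (ha : a = Codebook.codeword_lengths_at mem c (mem.i32 (Codebook.sorted_values_at mem c x)).toNat) :
    Site Live a 1 := by
  apply h.site_codeword_lengths hL _ _ ha
  have := h.K4c x hx
  rw [N_dense hs]
  omega

end CodebookOK

/-! ### FRAME

A clause of `CodebookOK` reads: fields of the struct at `c` (all of K1, K2, K5, the pointers and sizes of K3, K4, K6), the ghost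
block predicate (not memory), and — K4's sentinel and K4c only — the words of the `sorted_values` block. So ONE lemma,
`CodebookOK.transfer`: the struct is kept, the `sorted_values` block is kept, the owned blocks are still allocated ⇒ `CodebookOK`
again. The per-clause lemmas are for the segments of start_decoder that hold only some of the clauses. -/

namespace Codebook

/-- Every field of the `Codebook` at `c` reads the same in `mem'` as in `mem`. -/
structure SameFields (mem mem' : Mem) (c : Nat) : Prop where
  dimensions : Codebook.dimensions mem' c = Codebook.dimensions mem c
  entries : Codebook.entries mem' c = Codebook.entries mem c
  codeword_lengths : Codebook.codeword_lengths mem' c = Codebook.codeword_lengths mem c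
  minimum_value : Codebook.minimum_value mem' c = Codebook.minimum_value mem c
  delta_value : Codebook.delta_value mem' c = Codebook.delta_value mem c
  value_bits : Codebook.value_bits mem' c = Codebook.value_bits mem c
  lookup_type : Codebook.lookup_type mem' c = Codebook.lookup_type mem c
  sequence_p : Codebook.sequence_p mem' c = Codebook.sequence_p mem c
  sparse : Codebook.sparse mem' c = Codebook.sparse mem c
  lookup_values : Codebook.lookup_values mem' c = Codebook.lookup_values mem c
  multiplicands : Codebook.multiplicands mem' c = Codebook.multiplicands mem c
  codewords : Codebook.codewords mem' c = Codebook.codewords mem c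
  fast_huffman : ∀ k, k < 1024 → Codebook.fast_huffman mem' c k = Codebook.fast_huffman mem c k
  sorted_codewords : Codebook.sorted_codewords mem' c = Codebook.sorted_codewords mem c
  sorted_values : Codebook.sorted_values mem' c = Codebook.sorted_values mem c
  sorted_entries : Codebook.sorted_entries mem' c = Codebook.sorted_entries mem c

/-- **The struct reads the same ⇒ every field reads the same.** (`hs` from `Block.Same.of_writeLE`, `Block.Same.of_sameExcept`.) -/
theorem SameFields.of_same {mem mem' : Mem} {c : Nat} (hb : c + Off.sizeof.Codebook ≤ 2 ^ 64)
    (hs : (Block.mk c Off.sizeof.Codebook).Same mem mem') : SameFields mem mem' c := by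
  simp only [vblock, voff] at hs hb
  constructor
  · simp only [vacc, voff]
    exact hs.i32 _ (by omega) (by omega) (by omega)
  · simp only [vacc, voff]
    exact hs.i32 _ (by omega) (by omega) (by omega)
  · simp only [vacc, voff]
    exact hs.u64 _ (by omega) (by omega) (by omega)
  · simp only [vacc, voff]
    exact hs.u32 _ (by omega) (by omega) (by omega)
  · simp only [vacc, voff]
    exact hs.u32 _ (by omega) (by omega) (by omega)
  · simp only [vacc, voff]
    exact hs.u8 _ (by omega) (by omega) (by omega)
  · simp only [vacc, voff]
    exact hs.u8 _ (by omega) (by omega) (by omega)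
  · simp only [vacc, voff]
    exact hs.u8 _ (by omega) (by omega) (by omega)
  · simp only [vacc, voff]
    exact hs.u8 _ (by omega) (by omega) (by omega)
  · simp only [vacc, voff]
    exact hs.u32 _ (by omega) (by omega) (by omega)
  · simp only [vacc, voff]
    exact hs.u64 _ (by omega) (by omega) (by omega)
  · simp only [vacc, voff]
    exact hs.u64 _ (by omega) (by omega) (by omega)
  · intro k hk
    simp only [vacc, voff]
    exact hs.i16 _ (by omega) (by omega) (by omega)
  · simp only [vacc, voff]
    exact hs.u64 _ (by omega) (by omega) (by omega)
  · simp only [vacc, voff]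
    exact hs.u64 _ (by omega) (by omega) (by omega)
  · simp only [vacc, voff]
    exact hs.i32 _ (by omega) (by omega) (by omega)

/-- **The struct is kept ⇒ every field reads the same** (`hs` from `Block.Kept.of_writeLE`, `.of_sameExcept`, `.mono`,
`CodebooksOK.cb_kept`, an `AllKept`). -/
theorem SameFields.of_kept {mem mem' : Mem} {c : Nat} (hs : (Codebook.block c).Kept mem mem') : SameFields mem mem' c :=
  SameFields.of_same hs.inside hs.same

/-- Nothing changed. -/
theorem SameFields.refl (mem : Mem) (c : Nat) : SameFields mem mem c := by
  constructor <;> intros <;> rfl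

/-- N(c) reads the same. -/
theorem SameFields.N {mem mem' : Mem} {c : Nat} (e : SameFields mem mem' c) : N mem' c = N mem c := by
  unfold Codebook.N
  rw [e.sparse, e.entries, e.sorted_entries]

/-- The `codeword_lengths` block is the same block (the pointer and N(c) are fields of the struct). -/
theorem SameFields.clBlock {mem mem' : Mem} {c : Nat} (e : SameFields mem mem' c) : clBlock mem' c = clBlock mem c := by
  unfold Codebook.clBlock
  rw [e.codeword_lengths, e.N]

/-- The address of `sorted_values[x]` is the same. -/
theorem SameFields.sorted_values_at {mem mem' : Mem} {c : Nat} (e : SameFields mem mem' c) (x : Nat) :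
    Codebook.sorted_values_at mem' c x = Codebook.sorted_values_at mem c x := by
  simp only [Codebook.sorted_values_at, e.sorted_values]

/-- Frame of K1. -/
theorem K1.frame {mem mem' : Mem} {c : Nat} (h : K1 mem c) (e : SameFields mem mem' c) : K1 mem' c := by
  refine ⟨?_, ?_, ?_, ?_⟩
  · rw [e.dimensions]
    exact h.dim_pos
  · rw [e.dimensions]
    exact h.dim_le
  · rw [e.entries]
    exact h.ent_nonneg
  · rw [e.entries]
    exact h.ent_lt

/-- Frame of K2. -/
theorem K2.frame {mem mem' : Mem} {c : Nat} (h : K2 mem c) (e : SameFields mem mem' c) : K2 mem' c := by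
  refine ⟨?_, ?_, ?_, ?_, ?_⟩
  · rw [e.sparse]
    exact h.sparse_01
  · rw [e.sorted_entries]
    exact h.se_nonneg
  · rw [e.sorted_entries, e.entries]
    exact h.se_le
  · rw [e.sparse, e.sorted_entries]
    exact h.sparse_pos
  · rw [e.sparse, e.sorted_entries, e.entries]
    exact h.sparse_quarter

/-- Frame of K3 (the blocks are facts about the ghost block predicate: only the pointer and size fields are read). -/
theorem K3.frame {Blk : Block → Prop} {mem mem' : Mem} {c : Nat} (h : K3 Blk mem c) (e : SameFields mem mem' c) :
    K3 Blk mem' c := by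
  refine ⟨?_, ?_⟩
  · intro hs
    rw [e.sparse] at hs
    have k := h.dense hs
    refine ⟨?_, ?_⟩
    · rw [e.codeword_lengths, e.entries]
      exact k.lengths
    · rw [e.codewords, e.entries]
      exact k.codewords
  · intro hs
    rw [e.sparse] at hs
    have k := h.sparse hs
    refine ⟨?_, ?_⟩
    · rw [e.codeword_lengths, e.sorted_entries]
      exact k.lengths
    · rw [e.codewords]
      exact k.codewords_null

/-- Frame of K4: the struct's fields, and the sentinel word. -/
theorem K4.frame {Blk : Block → Prop} {mem mem' : Mem} {c : Nat} (h : K4 Blk mem c) (e : SameFields mem mem' c)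
    (hw : 1 ≤ Codebook.sorted_entries mem c →
      mem'.i32 (Codebook.sorted_values mem c - 4) = mem.i32 (Codebook.sorted_values mem c - 4)) : K4 Blk mem' c := by
  refine ⟨?_, ?_, ?_, ?_⟩
  · rw [e.sorted_entries, e.sorted_codewords]
    exact h.sc
  · rw [e.sorted_entries, e.sorted_values]
    exact h.sv
  · rw [e.sorted_entries, e.sorted_values]
    intro hse
    rw [hw hse]
    exact h.sentinel hse
  · rw [e.sorted_entries, e.sorted_codewords, e.sorted_values]
    exact h.null

/-- Frame of K4c: the struct's fields, and the words `sorted_values[0 .. se)`. -/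
theorem K4c.frame {mem mem' : Mem} {c : Nat} (h : K4c mem c) (e : SameFields mem mem' c)
    (hw : ∀ x : Nat, (x : Int) < Codebook.sorted_entries mem c →
      mem'.i32 (Codebook.sorted_values_at mem c x) = mem.i32 (Codebook.sorted_values_at mem c x)) : K4c mem' c := by
  intro x hx
  rw [e.sorted_entries] at hx
  rw [e.sorted_values_at x, hw x hx, e.entries]
  exact h x hx

/-- Frame of K5 (the table is inside the struct). -/
theorem K5.frame {mem mem' : Mem} {c : Nat} (h : K5 mem c) (e : SameFields mem mem' c) : K5 mem' c := by
  intro k hk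
  rw [e.fast_huffman k hk, e.N]
  exact h k hk

/-- Frame of `K5b`. -/
theorem K5b.frame {mem mem' : Mem} {c : Nat} {b : Int} (h : K5b mem c b) (e : SameFields mem mem' c) : K5b mem' c b := by
  intro k hk
  rw [e.fast_huffman k hk]
  exact h k hk

/-- Frame of K6. -/
theorem K6.frame {Blk : Block → Prop} {mem mem' : Mem} {c : Nat} (h : K6 Blk mem c) (e : SameFields mem mem' c) :
    K6 Blk mem' c := by
  refine ⟨?_, ?_, ?_, ?_⟩
  · rw [e.lookup_type]
    exact h.type_02
  · rw [e.lookup_type, e.N, e.dimensions]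
    exact h.prod_le
  · rw [e.lookup_type, e.N, e.dimensions, e.multiplicands]
    exact h.mults
  · rw [e.lookup_type, e.multiplicands]
    exact h.null

end Codebook

/-- **The blocks the SHAPE clauses of `CodebookOK c` mention** (each under the condition of its clause): `codeword_lengths`
(N(c) bytes), `codewords` (dense: 4·entries), `sorted_codewords` and `sorted_values − 4` (`se ≥ 1`: 4(se+1) each),
`multiplicands` (`lookup_type = 2`: K6 says "at least 4·N(c)·dimensions", the size is a ghost, so EVERY size `sz`). -/
inductive CodebookOK.Owns (mem : Mem) (c : Nat) : Block → Prop
  /-- `Block(codeword_lengths, N(c))` (K3n / K3s) -/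
  | lengths : CodebookOK.Owns mem c ⟨Codebook.codeword_lengths mem c, (Codebook.N mem c).toNat⟩
  /-- `Block(codewords, 4·entries)` of a dense book (K3n) -/
  | codewords (hs : Codebook.sparse mem c = 0) :
      CodebookOK.Owns mem c ⟨Codebook.codewords mem c, 4 * (Codebook.entries mem c).toNat⟩
  /-- `Block(sorted_codewords, 4(se+1))`, `se ≥ 1` (K4) -/
  | sorted_codewords (hse : 1 ≤ Codebook.sorted_entries mem c) :
      CodebookOK.Owns mem c ⟨Codebook.sorted_codewords mem c, 4 * ((Codebook.sorted_entries mem c).toNat + 1)⟩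
  /-- `Block(sorted_values − 4, 4(se+1))`, `se ≥ 1` (K4): `Codebook.svBlock mem c` -/
  | sorted_values (hse : 1 ≤ Codebook.sorted_entries mem c) :
      CodebookOK.Owns mem c ⟨Codebook.sorted_values mem c - 4, 4 * ((Codebook.sorted_entries mem c).toNat + 1)⟩
  /-- `Block(multiplicands, sz)`, `lookup_type = 2` (K6) -/
  | multiplicands (ht : Codebook.lookup_type mem c = 2) (sz : Nat) :
      CodebookOK.Owns mem c ⟨Codebook.multiplicands mem c, sz⟩

/-- **The block whose CONTENT `CodebookOK c` reads and which it owns**: the `sorted_values` block (sentinel + table), `se ≥ 1`.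
(The struct at `c` itself is read too; it is a part of the codebooks block, which `CodebooksOK` owns.) -/
inductive CodebookOK.Reads (mem : Mem) (c : Nat) : Block → Prop
  /-- `Block(sorted_values − 4, 4(se+1))` (K4's sentinel, K4c) -/
  | sorted_values (hse : 1 ≤ Codebook.sorted_entries mem c) : CodebookOK.Reads mem c (Codebook.svBlock mem c)

/-- The `sorted_values` block is allocated (K4). -/
theorem CodebookOK.reads_blk {Blk : Block → Prop} {mem : Mem} {c : Nat} {B : Block} (h : CodebookOK Blk mem c)
    (hR : CodebookOK.Reads mem c B) : Blk B := by
  cases hR with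
  | sorted_values hse => exact h.K4.sv hse

/-- **At the base of every owned block there is an allocated block.** (Not `Blk B` itself: the size of the `multiplicands` table
is a ghost of K6, `Owns` ranges over all sizes. For the other four constructors the witness is the owned block; the one block
whose CONTENT is read, `sorted_values`, is `reads_blk`.) -/
theorem CodebookOK.owns_blk {Blk : Block → Prop} {mem : Mem} {c : Nat} {B : Block} (h : CodebookOK Blk mem c)
    (hO : CodebookOK.Owns mem c B) : ∃ sz, Blk ⟨B.base, sz⟩ := by
  cases hO with
  | lengths => exact ⟨_, h.lengths_block⟩
  | codewords hs => exact ⟨_, (h.K3.dense hs).codewords⟩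
  | sorted_codewords hse => exact ⟨_, h.K4.sc hse⟩
  | sorted_values hse => exact ⟨_, h.K4.sv hse⟩
  | multiplicands ht sz =>
    obtain ⟨sz', _, hb⟩ := h.K6.mults ht
    exact ⟨sz', hb⟩

/-- **The block predicate changes, the memory does not** (a block was allocated; `setup_temp_free` / `arena_temp_restore` / an
epilogue removed one): `CodebookOK` holds again if every block it owns that was allocated still is. (The instance `mem' = mem`
of `transfer`, proved directly so that it needs no no-wrap hypothesis.) -/
theorem CodebookOK.reblk {Blk Blk' : Block → Prop} {mem : Mem} {c : Nat} (h : CodebookOK Blk mem c)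
    (hB : ∀ B, CodebookOK.Owns mem c B → Blk B → Blk' B) : CodebookOK Blk' mem c := by
  refine ⟨h.K1, h.K2, ⟨?_, ?_⟩, ⟨?_, ?_, h.K4.sentinel, h.K4.null⟩, h.K4c, h.K5, ⟨h.K6.type_02, h.K6.prod_le, ?_, h.K6.null⟩⟩
  · intro hs
    have k := h.K3.dense hs
    have hl := hB _ CodebookOK.Owns.lengths h.lengths_block
    rw [Codebook.N_dense hs] at hl
    exact ⟨hl, hB _ (CodebookOK.Owns.codewords hs) k.codewords⟩
  · intro hs
    have k := h.K3.sparse hs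
    have hne : Codebook.sparse mem c ≠ 0 := by omega
    have hl := hB _ CodebookOK.Owns.lengths h.lengths_block
    rw [Codebook.N_sparse hne] at hl
    exact ⟨hl, k.codewords_null⟩
  · intro hse
    exact hB _ (CodebookOK.Owns.sorted_codewords hse) (h.K4.sc hse)
  · intro hse
    exact hB _ (CodebookOK.Owns.sorted_values hse) (h.K4.sv hse)
  · intro ht
    obtain ⟨sz, hsz, hb⟩ := h.K6.mults ht
    exact ⟨sz, hsz, hB _ (CodebookOK.Owns.multiplicands ht sz) hb⟩

/-- **The frame lemma of `CodebookOK`** (the codebook does not move: `c` on both sides): if the struct at `c` is kept, and (when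
the book has sorted tables) the `sorted_values` block `[sorted_values − 4, sorted_values + 4·se)` is kept, and the owned blocks
are still allocated, `CodebookOK` holds in the new memory for the new block predicate. Nothing else is read: the contents of
`codeword_lengths`, `codewords`, `sorted_codewords`, `multiplicands` are free. -/
theorem CodebookOK.transfer {Blk Blk' : Block → Prop} {mem mem' : Mem} {c : Nat} (h : CodebookOK Blk mem c)
    (hs : (Codebook.block c).Kept mem mem')
    (hv : 1 ≤ Codebook.sorted_entries mem c → (Codebook.svBlock mem c).Kept mem mem')
    (hB : ∀ B, CodebookOK.Owns mem c B → Blk B → Blk' B) : CodebookOK Blk' mem' c := by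
  have h' := h.reblk hB
  have e : Codebook.SameFields mem mem' c := Codebook.SameFields.of_kept hs
  refine ⟨h'.K1.frame e, h'.K2.frame e, h'.K3.frame e, h'.K4.frame e ?_, h'.K4c.frame e ?_, h'.K5.frame e, h'.K6.frame e⟩
  · intro hse
    apply (hv hse).i32
    · exact Nat.le_refl _
    · simp only []
      omega
  · intro x hx
    have hse : 1 ≤ Codebook.sorted_entries mem c := by omega
    simp only [Codebook.sorted_values_at]
    apply (hv hse).i32
    · simp only []
      omega
    · simp only []
      omega

/-- **FRAME of `CodebookOK`**: the instance `Blk' = Blk` of `transfer`. -/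
theorem CodebookOK.frame {Blk : Block → Prop} {mem mem' : Mem} {c : Nat} (h : CodebookOK Blk mem c)
    (hs : (Codebook.block c).Kept mem mem')
    (hv : 1 ≤ Codebook.sorted_entries mem c → (Codebook.svBlock mem c).Kept mem mem') : CodebookOK Blk mem' c :=
  h.transfer hs hv (fun _ _ hb => hb)

/-- The struct at `c` does not wrap when it lies inside an allocated block. -/
theorem Codebook.block_no_wrap {Blk : Block → Prop} {c : Nat} (hok : BlkOK Blk) {B : Block} (hB : Blk B)
    (hin : B.contains c Off.sizeof.Codebook) : (Codebook.block c).base + (Codebook.block c).size ≤ 2 ^ 64 := by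
  have := hok.no_wrap hB
  simp only [vblock] at hin
  simp only []
  omega

/-- **The commonest case: one store of the walker, inside a block `X` that meets neither the struct nor the `sorted_values` block**
(a field of `*f`, an output sample, a temp block, another codebook's table). The struct lies inside the allocated block `B`. -/
theorem CodebookOK.frame_writeLE {Blk : Block → Prop} {mem : Mem} {c : Nat} (h : CodebookOK Blk mem c) (hok : BlkOK Blk)
    {B : Block} (hB : Blk B) (hin : B.contains c Off.sizeof.Codebook) (X : Block) (b k v : Nat) (hX : X.contains b k)
    (hXt : X.base + X.size ≤ 2 ^ 64) (hd1 : (Codebook.block c).disjoint X)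
    (hd2 : 1 ≤ Codebook.sorted_entries mem c → (Codebook.svBlock mem c).disjoint X) :
    CodebookOK Blk (mem.writeLE (addr b) k v) c := by
  apply h.frame
  · exact Block.Kept.of_writeLE mem b k v hd1 hX hXt (Codebook.block_no_wrap hok hB hin)
  · intro hse
    exact Block.Kept.of_writeLE mem b k v (hd2 hse) hX hXt (hok.no_wrap (h.K4.sv hse))

/-- **A callee whose footprint meets neither the struct nor the `sorted_values` block keeps `CodebookOK`.** -/
theorem CodebookOK.frame_sameExcept {Blk : Block → Prop} {mem mem' : Mem} {c : Nat} (h : CodebookOK Blk mem c)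
    (hok : BlkOK Blk) {B : Block} (hB : Blk B) (hin : B.contains c Off.sizeof.Codebook) {ws : List Span}
    (hs : Mem.SameExcept ws mem mem')
    (hd1 : ∀ w, w ∈ ws → (Codebook.block c).base + (Codebook.block c).size ≤ w.lo ∨ w.hi ≤ (Codebook.block c).base)
    (hd2 : 1 ≤ Codebook.sorted_entries mem c → ∀ w, w ∈ ws →
      (Codebook.svBlock mem c).base + (Codebook.svBlock mem c).size ≤ w.lo ∨ w.hi ≤ (Codebook.svBlock mem c).base) :
    CodebookOK Blk mem' c := by
  apply h.frame
  · exact Block.Kept.of_sameExcept hs hd1 (Codebook.block_no_wrap hok hB hin)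
  · intro hse
    exact Block.Kept.of_sameExcept hs (hd2 hse) (hok.no_wrap (h.K4.sv hse))

/-- **`CodebookOK` is `Group.Stable`**: every allocated block is kept, no block was freed, the struct lies inside an allocated
block ⇒ `CodebookOK` again. (What Vorbis/State.lean asks of the per-codebook group.) -/
theorem CodebookOK.stable : Group.Stable CodebookOK Off.sizeof.Codebook := by
  intro Blk Blk' mem mem' c hall hsub hin h
  obtain ⟨B, hB, hc⟩ := hin
  simp only [vblock] at hc
  apply h.transfer
  · exact (hall B hB).mono hc.1 hc.2
  · intro hse
    exact hall _ (h.K4.sv hse)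
  · intro B' _ hb
    exact hsub B' hb

/-! ### Lemma DecodeRaw, as a statement

The lemma itself is about code (seven inline expansions and codebook_decode_scalar_raw); its proof is the walk of those units.
Here: the two result predicates their contracts use, and the three pure steps every expansion repeats. -/

/-- **The result of `DECODE_RAW(var, f, c)`** (= `DECODE_VQ`, = the return value of codebook_decode_scalar_raw):
`var = −1 ∨ 0 ≤ var < N(c)`. −1 is the only negative value. -/
def DecodeRawResult (mem : Mem) (c : Nat) (v : Int) : Prop :=
  v = -1 ∨ (0 ≤ v ∧ v < Codebook.N mem c)

/-- **The result of `DECODE(var, f, c)`**: `var = −1 ∨ 0 ≤ var < c.entries` (an index of `classdata`, R8a). -/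
def DecodeResult (mem : Mem) (c : Nat) (v : Int) : Prop :=
  v = -1 ∨ (0 ≤ v ∧ v < Codebook.entries mem c)

/-- The word DECODE's translation step loads for `var : Int`, `var ≥ −1`: `c->sorted_values[var]`, at the number address
`(sorted_values − 4) + 4·(var + 1)`. For `var = −1` it is the sentinel. -/
def Codebook.sortedValue (mem : Mem) (c : Nat) (v : Int) : Int :=
  mem.i32 (Codebook.sorted_values mem c - 4 + 4 * (v + 1).toNat)

namespace CodebookOK
open Codebook

/-- Step 1, the fast path: a non-negative `fast_huffman[k]` is a DECODE_RAW result. -/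
theorem decodeRaw_fast {Blk : Block → Prop} {mem : Mem} {c : Nat} (h : CodebookOK Blk mem c) (k : Nat) (hk : k < 1024) :
    DecodeRawResult mem c (Codebook.fast_huffman mem c k) := by
  cases h.K5 k hk with
  | inl h1 => exact Or.inl h1
  | inr h2 => exact Or.inr ⟨h2.1, h2.2.1⟩

/-- Step 2a, the sparse binary search: its result `x < se` is returned as it is; `N(c) = se`. -/
theorem decodeRaw_search_sparse {Blk : Block → Prop} {mem : Mem} {c : Nat} (_h : CodebookOK Blk mem c)
    (hs : Codebook.sparse mem c ≠ 0) (x : Nat) (hx : (x : Int) < Codebook.sorted_entries mem c) :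
    DecodeRawResult mem c (x : Int) := by
  right
  rw [N_sparse hs]
  omega

/-- Step 2b, the dense binary search: the result `x < se` is translated by `sorted_values`; the value is below `entries = N(c)` (K4c). -/
theorem decodeRaw_search_dense {Blk : Block → Prop} {mem : Mem} {c : Nat} (h : CodebookOK Blk mem c)
    (hs : Codebook.sparse mem c = 0) (x : Nat) (hx : (x : Int) < Codebook.sorted_entries mem c) :
    DecodeRawResult mem c (mem.i32 (Codebook.sorted_values_at mem c x)) := by
  right
  have := h.K4c x hx
  rw [N_dense hs]
  omega

/-- Step 2c, the linear search (dense, `entries ≤ 8` or no sorted table): its result `i < entries`. -/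
theorem decodeRaw_linear {Blk : Block → Prop} {mem : Mem} {c : Nat} (_h : CodebookOK Blk mem c)
    (hs : Codebook.sparse mem c = 0) (i : Nat) (hi : (i : Int) < Codebook.entries mem c) :
    DecodeRawResult mem c (i : Int) := by
  right
  rw [N_dense hs]
  omega

/-- A dense book: DECODE has no translation step, and the DECODE_RAW result is already below `entries`. -/
theorem decode_dense {Blk : Block → Prop} {mem : Mem} {c : Nat} (_h : CodebookOK Blk mem c)
    (hs : Codebook.sparse mem c = 0) {v : Int} (hv : DecodeRawResult mem c v) : DecodeResult mem c v := by
  cases hv with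
  | inl h1 => exact Or.inl h1
  | inr h2 =>
    right
    rw [N_dense hs] at h2
    exact h2

/-- **Step 3, the translation `if (c->sparse) var = c->sorted_values[var]` of DECODE, the address**: for a DECODE_RAW result `v` of a
sparse book the word loaded lies in the `sorted_values` block — for `v = −1` it is the word BEFORE the pointer. For any spelling
`a` of `(sorted_values − 4) + 4·(v + 1)` (the machine's form: `addr_add_word_mul4`). -/
theorem site_sortedValue {Blk : Block → Prop} {Live : Nat → Prop} {mem : Mem} {c : Nat} (hL : BlkLive Blk Live)
    (h : CodebookOK Blk mem c) (hs : Codebook.sparse mem c ≠ 0) {v : Int} (hv : DecodeRawResult mem c v) {a : Nat}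
    (ha : a = Codebook.sorted_values mem c - 4 + 4 * (v + 1).toNat) : Site Live a 4 := by
  subst ha
  have hse := h.se_pos_of_sparse hs
  have hN := N_sparse (mem := mem) (c := c) hs
  apply Site.of_blk hL (h.K4.sv hse)
  · simp only []
    omega
  · simp only []
    cases hv with
    | inl h1 => omega
    | inr h2 => omega
  · omega

/-- **Step 3, the value**: the translated word is a DECODE result: −1 for −1 (the sentinel), an entry number otherwise (K4c).
(`hok`: the `sorted_values` block is not based at NULL, so `sorted_values − 4` is a true subtraction.) -/
theorem decode_sparse {Blk : Block → Prop} {mem : Mem} {c : Nat} (h : CodebookOK Blk mem c) (hok : BlkOK Blk)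
    (hs : Codebook.sparse mem c ≠ 0) {v : Int} (hv : DecodeRawResult mem c v) :
    DecodeResult mem c (Codebook.sortedValue mem c v) := by
  have hse := h.se_pos_of_sparse hs
  have hge := h.sorted_values_ge hok hse
  unfold Codebook.sortedValue
  cases hv with
  | inl h1 =>
    left
    rw [h1]
    have e0 : ((-1 : Int) + 1).toNat = 0 := rfl
    rw [e0, Nat.mul_zero, Nat.add_zero]
    exact h.K4.sentinel hse
  | inr h2 =>
    right
    rw [N_sparse hs] at h2
    have hx : ((v.toNat : Nat) : Int) < Codebook.sorted_entries mem c := by omega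
    have hk := h.K4c v.toNat hx
    have e : Codebook.sorted_values mem c - 4 + 4 * (v + 1).toNat = Codebook.sorted_values_at mem c v.toNat := by
      simp only [Codebook.sorted_values_at]
      omega
    rw [e]
    exact hk

end CodebookOK

/-- Numbers that agree modulo `2^64` are the same word. -/
theorem addr_eq_of_mod {a b : Nat} (h : a % 2 ^ 64 = b % 2 ^ 64) : addr a = addr b := by
  unfold addr
  rw [← UInt64.ofNat_mod_size (x := a), ← UInt64.ofNat_mod_size (x := b), h]

/-- The machine address of DECODE's translation load: `sorted_values + 4·sext(var)` as words, for `var ≥ −1`, is the number address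
`(sorted_values − 4) + 4·(var + 1)` of `Codebook.sortedValue` (no wrap-around reasoning left to the walker). -/
theorem addr_add_word_mul4 (sv : Nat) (v : Int) (hv : -1 ≤ v) (hsv : 4 ≤ sv) :
    addr sv + word v * 4 = addr (sv - 4 + 4 * (v + 1).toNat) := by
  have e4 : (4 : Word) = addr 4 := rfl
  by_cases hneg : v = -1
  · subst hneg
    have e1 : word (-1) = addr 18446744073709551615 := rfl
    rw [e1, e4, addr_mul_addr, addr_add_addr]
    apply addr_eq_of_mod
    have e3 : ((-1 : Int) + 1).toNat = 0 := rfl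
    rw [e3]
    omega
  · have h0 : 0 ≤ v := by omega
    rw [word_nonneg v h0, e4, addr_mul_addr, addr_add_addr]
    congr 1
    omega

/-- The case `var = −1` of `addr_add_word_mul4`: the sentinel's address. -/
theorem addr_add_word_m1_mul4 (sv : Nat) (hsv : 4 ≤ sv) : addr sv + word (-1) * 4 = addr (sv - 4) := by
  rw [addr_add_word_mul4 sv (-1) (by omega) hsv]
  have e : ((-1 : Int) + 1).toNat = 0 := rfl
  rw [e, Nat.mul_zero, Nat.add_zero]

end Vorbis
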